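-- pv_equiv track=rewrite | github.com/aanstr/Urban_Py_Dev | Module_2/module_2_hard.py | result
-- ===== SOURCE A (Python) =====
-- def result(n):
--     get_result = []
--     for i in range(1, n):
--         pairs = []
--         for j in range(1, 20):
--             k = i + j
--             if i < j and n % k == 0:
--                 pairs.append(i)
--                 pairs.append(j)
--         get_result.append(pairs)
--     get_result = sorted(get_result)
--     return get_result
-- ===== SOURCE B (Python) =====
-- def result(n):
--     # Only i in 1..18 can yield pairs (i < j < 20); everything else is an empty sublist,
--     # and [] sorts before any non-empty list, so build the output directly.
--     nonempty = []
--     for i in range(1, min(n, 20)):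
--         pairs = [x for j in range(i + 1, 20) if n % (i + j) == 0 for x in (i, j)]
--         if pairs:
--             nonempty.append(pairs)
--     total = n - 1 if n > 1 else 0
--     return [[] for _ in range(total - len(nonempty))] + nonempty
-- ===== Notes on version B (the rewrite author's own statement) =====
-- stated objective: faster
-- what changed: Instead of scanning every i in 1..n-1 (19 trial divisions each) and then sorting n-1 sublists, B builds only the possible non-empty sublists (i in 1..min(n,20)-1, since pairs need i < j < 20), which are already in sorted order, and prepends the right number of empty sublists, which sort before any non-empty list.
import Mathlib
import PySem

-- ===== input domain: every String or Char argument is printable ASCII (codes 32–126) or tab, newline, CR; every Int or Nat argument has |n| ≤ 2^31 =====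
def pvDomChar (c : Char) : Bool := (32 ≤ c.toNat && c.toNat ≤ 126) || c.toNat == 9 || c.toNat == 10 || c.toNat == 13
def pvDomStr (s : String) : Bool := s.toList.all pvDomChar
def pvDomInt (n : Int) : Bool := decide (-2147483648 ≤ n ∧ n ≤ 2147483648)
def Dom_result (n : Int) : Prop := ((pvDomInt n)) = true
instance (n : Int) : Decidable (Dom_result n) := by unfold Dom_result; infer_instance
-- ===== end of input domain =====

-- B avoids A's scan of all of 1..n-1 and A's sort of n-1 sublists: only i in 1..18 can
-- contribute a non-empty sublist, so B builds just those (already in sorted order) and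
-- prepends the right number of empty sublists, which sort before every non-empty one.

-- ===== PORT A =====
-- inner loop of A: for j in range(1, 20): k = i + j; if i < j and n % k == 0: pairs.append(i); pairs.append(j)
def pairsA (n i : Int) : List Int :=
  (PySem.List.pyRange 1 20 1).foldl
    (fun pairs j => if i < j ∧ PySem.Int.mod n (i + j) = 0 then (pairs ++ [i]) ++ [j] else pairs) []

def result (n : Int) : List (List Int) :=
  let get_result := (PySem.List.pyRange 1 n 1).foldl (fun acc i => acc ++ [pairsA n i]) []
  PySem.List.sorted get_result (fun x => x) false

-- ===== PORT B =====
-- B's comprehension: [x for j in range(i + 1, 20) if n % (i + j) == 0 for x in (i, j)]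
def pairsB (n i : Int) : List Int :=
  (PySem.List.pyRange (i + 1) 20 1).flatMap (fun j => if PySem.Int.mod n (i + j) = 0 then [i, j] else [])

def result_alt (n : Int) : List (List Int) :=
  let ne := (PySem.List.pyRange 1 (min n 20) 1).foldl
    (fun acc i => if pairsB n i ≠ [] then acc ++ [pairsB n i] else acc) []
  let total : Int := if 1 < n then n - 1 else 0
  (PySem.List.pyRange 0 (total - (ne.length : Int)) 1).map (fun _ => ([] : List Int)) ++ ne

-- ===== PRECONDITION & SPEC =====
def Spec_result (n : Int) (out : List (List Int)) : Prop := out = result_alt n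
instance (n : Int) (out : List (List Int)) : Decidable (Spec_result n out) := by unfold Spec_result; infer_instance

-- ===== CLAIM (what is proved, stated in full; the proofs are below) =====
def Claim_equal_result : Prop := ∀ (n : Int), Dom_result n → Spec_result n (result n)

-- ===== LEMMAS AND PROOFS =====

lemma pairsA_eq_flatMap (n i : Int) : pairsA n i =
    (PySem.List.pyRange 1 20 1).flatMap
      (fun j => if i < j ∧ PySem.Int.mod n (i + j) = 0 then [i, j] else []) := by
  unfold pairsA
  rw [show (fun (pairs : List Int) (j : Int) =>
        if i < j ∧ PySem.Int.mod n (i + j) = 0 then (pairs ++ [i]) ++ [j] else pairs)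
      = (fun (pairs : List Int) (j : Int) =>
        pairs ++ (if i < j ∧ PySem.Int.mod n (i + j) = 0 then [i, j] else [])) from by
    funext acc j; split <;> simp]
  rw [PySem.List.foldl_append_eq_flatMap]
  simp

lemma pairsA_eq_nil_of_ge (n i : Int) (hi : 19 ≤ i) : pairsA n i = [] := by
  rw [pairsA_eq_flatMap, List.flatMap_eq_nil_iff]
  intro j hj
  rw [PySem.List.mem_pyRange_one] at hj
  exact if_neg (by rintro ⟨h, -⟩; omega)

lemma pairsA_eq_pairsB (n i : Int) (hi : 1 ≤ i) : pairsA n i = pairsB n i := by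
  rw [pairsA_eq_flatMap]; unfold pairsB
  by_cases h19 : 19 ≤ i
  · rw [PySem.List.pyRange_one_eq_nil (by omega : (20 : Int) ≤ i + 1), List.flatMap_nil,
      List.flatMap_eq_nil_iff]
    intro j hj
    rw [PySem.List.mem_pyRange_one] at hj
    exact if_neg (by rintro ⟨h, -⟩; omega)
  · rw [show PySem.List.pyRange 1 20 1
          = PySem.List.pyRange 1 (i + 1) 1 ++ PySem.List.pyRange (i + 1) 20 1 from
        PySem.List.pyRange_one_append 1 (i + 1) 20 (by omega) (by omega)]
    rw [List.flatMap_append]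
    have h1 : (PySem.List.pyRange 1 (i + 1) 1).flatMap
        (fun j => if i < j ∧ PySem.Int.mod n (i + j) = 0 then [i, j] else []) = [] := by
      rw [List.flatMap_eq_nil_iff]
      intro j hj
      rw [PySem.List.mem_pyRange_one] at hj
      exact if_neg (by rintro ⟨h, -⟩; omega)
    rw [h1, List.nil_append]
    apply List.flatMap_congr
    intro j hj
    rw [PySem.List.mem_pyRange_one] at hj
    have hij : i < j := by omega
    by_cases hc : PySem.Int.mod n (i + j) = 0 <;> simp [hij, hc]

lemma flatMap_pair_head (i : Int) (c : Int → Prop) [DecidablePred c] :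
    ∀ (l : List Int), l.flatMap (fun j => if c j then [i, j] else []) ≠ [] →
      ∃ t, l.flatMap (fun j => if c j then [i, j] else []) = i :: t := by
  intro l
  induction l with
  | nil => simp
  | cons j l ih =>
    by_cases hc : c j
    · intro _
      exact ⟨j :: l.flatMap (fun j => if c j then [i, j] else []), by simp [hc]⟩
    · simpa [hc] using ih

lemma pairsA_head (n i : Int) (h : pairsA n i ≠ []) : ∃ t, pairsA n i = i :: t := by
  rw [pairsA_eq_flatMap] at h ⊢
  exact flatMap_pair_head i _ _ h

lemma nil_le_list (l : List Int) : ([] : List Int) ≤ l := by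
  cases l with
  | nil => exact le_refl _
  | cons a t => exact le_of_lt List.Lex.nil

lemma pairwise_le_replicate_nil (k : Nat) :
    (List.replicate k ([] : List Int)).Pairwise (· ≤ ·) := by
  induction k with
  | zero => simp
  | succ k ih =>
    rw [List.replicate_succ]
    exact List.Pairwise.cons (fun b hb => (List.eq_of_mem_replicate hb) ▸ le_refl _) ih

lemma sorted_lex_bridge (xs : List (List Int)) :
    PySem.List.sorted xs (fun x => x) false
      = @PySem.List.sorted (List Int) (List Int) LinearOrder.toPartialOrder.toLT
          LinearOrder.toDecidableLT xs (fun x => x) false := by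
  rw [@PySem.List.sorted_eq_foldl_insertBy (List Int) (List Int) List.instLT
      (fun a b => a.decidableLT b) xs (fun x => x)]
  rw [@PySem.List.sorted_eq_foldl_insertBy (List Int) (List Int) LinearOrder.toPartialOrder.toLT
      LinearOrder.toDecidableLT xs (fun x => x)]
  have hcmp : (fun (a b : List Int) => @decide (@LT.lt _ List.instLT a b) (a.decidableLT b))
      = (fun (a b : List Int) => @decide (@LT.lt _ LinearOrder.toPartialOrder.toLT a b)
          (LinearOrder.toDecidableLT a b)) := by
    funext a b
    rw [decide_eq_decide]
  exact congrArg (fun c => List.foldl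
    (fun (acc : List (List Int)) (x : List Int) => PySem.List.insertBy c x acc) [] xs) hcmp

lemma result_eq_alt (n : Int) : result n = result_alt n := by
  unfold result result_alt
  rw [PySem.List.foldl_append_singleton_eq_map, List.nil_append]
  rw [PySem.List.foldl_append_ite (fun i => pairsB n i ≠ []) (fun i => pairsB n i), List.nil_append]
  set xs : List (List Int) := (PySem.List.pyRange 1 n 1).map (pairsA n) with hxs
  set neB : List (List Int) :=
    ((PySem.List.pyRange 1 (min n 20) 1).filter (fun i => decide (pairsB n i ≠ []))).map (pairsB n)
    with hneB
  -- B's non-empty block equals A's non-empty sublists, filtered and mapped over the full range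
  have hBA : neB = ((PySem.List.pyRange 1 n 1).filter (fun i => decide (pairsA n i ≠ []))).map (pairsA n) := by
    rw [hneB]
    have hfc : (PySem.List.pyRange 1 (min n 20) 1).filter (fun i => decide (pairsB n i ≠ []))
        = (PySem.List.pyRange 1 (min n 20) 1).filter (fun i => decide (pairsA n i ≠ [])) := by
      apply List.filter_congr
      intro i hi
      rw [PySem.List.mem_pyRange_one] at hi
      rw [pairsA_eq_pairsB n i hi.1]
    rw [hfc]
    have hrange : (PySem.List.pyRange 1 (min n 20) 1).filter (fun i => decide (pairsA n i ≠ []))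
        = (PySem.List.pyRange 1 n 1).filter (fun i => decide (pairsA n i ≠ [])) := by
      by_cases h20 : n ≤ 20
      · rw [min_eq_left h20]
      · rw [min_eq_right (by omega : (20 : Int) ≤ n)]
        rw [show PySem.List.pyRange 1 n 1
              = PySem.List.pyRange 1 20 1 ++ PySem.List.pyRange 20 n 1 from
            PySem.List.pyRange_one_append 1 20 n (by omega) (by omega)]
        rw [List.filter_append]
        have h2 : (PySem.List.pyRange 20 n 1).filter (fun i => decide (pairsA n i ≠ [])) = [] := by
          rw [List.filter_eq_nil_iff]
          intro i hi
          rw [PySem.List.mem_pyRange_one] at hi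
          simp [pairsA_eq_nil_of_ge n i (by omega)]
        rw [h2, List.append_nil]
    rw [hrange]
    apply List.map_congr_left
    intro i hi
    have := List.mem_of_mem_filter hi
    rw [PySem.List.mem_pyRange_one] at this
    exact (pairsA_eq_pairsB n i this.1).symm
  -- A's sorted list is: the empty sublists first, then the non-empty ones in order
  have hsorted : PySem.List.sorted xs (fun x => x) false
      = List.replicate (xs.count []) [] ++ xs.filter (fun x => !(x == [])) := by
    rw [sorted_lex_bridge]
    apply PySem.List.sorted_id_eq_of_perm_of_pairwise
    · rw [← List.filter_beq]
      exact List.filter_append_perm _ xs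
    · rw [List.pairwise_append]
      refine ⟨pairwise_le_replicate_nil _, ?_, ?_⟩
      · rw [List.filter_map, List.pairwise_map]
        have hpw : ((PySem.List.pyRange 1 n 1).filter
            ((fun x => !(x == ([] : List Int))) ∘ pairsA n)).Pairwise (· < ·) :=
          (PySem.List.pairwise_lt_pyRange_one 1 n).filter _
        refine hpw.imp_of_mem ?_
        intro a b ha hb hab
        have hA : pairsA n a ≠ [] := by
          have := List.of_mem_filter ha; simpa using this
        have hB : pairsA n b ≠ [] := by
          have := List.of_mem_filter hb; simpa using this
        obtain ⟨t, ht⟩ := pairsA_head n a hA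
        obtain ⟨t', ht'⟩ := pairsA_head n b hB
        rw [ht, ht']
        exact le_of_lt (List.Lex.rel hab)
      · intro a ha b _
        rw [List.eq_of_mem_replicate ha]
        exact nil_le_list b
  rw [hsorted]
  -- the two pieces coincide
  have hne : xs.filter (fun x => !(x == [])) = neB := by
    rw [hBA, hxs, List.filter_map]
    congr 1
    apply List.filter_congr
    intro i _
    cases h : pairsA n i <;> simp [h]
  rw [hne]
  congr 1
  -- count of empty sublists = total - number of non-empty ones
  have hlen : xs.count [] + neB.length = xs.length := by
    have hperm : (List.replicate (xs.count []) ([] : List Int)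
        ++ xs.filter (fun x => !(x == []))).Perm xs := by
      rw [← List.filter_beq]
      exact List.filter_append_perm _ xs
    have := hperm.length_eq
    rw [hne] at this
    simpa using this
  have hxl : xs.length = (n - 1).toNat := by
    rw [hxs, List.length_map, PySem.List.length_pyRange_one]
  rw [PySem.List.pyRange_one]
  rw [List.map_map]
  have hrep : ∀ (m : Int), (List.range (m - 0).toNat).map
        ((fun _ => ([] : List Int)) ∘ (fun k : Nat => (0 : Int) + (k : Int)))
      = List.replicate (m - 0).toNat [] := by
    intro m
    rw [show ((fun _ => ([] : List Int)) ∘ (fun k : Nat => (0 : Int) + (k : Int)))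
        = (fun _ : Nat => ([] : List Int)) from rfl]
    rw [List.map_const', List.length_range]
  rw [hrep]
  congr 1
  by_cases h1 : 1 < n
  · rw [if_pos h1]
    omega
  · rw [if_neg h1]
    have : xs.length = 0 := by omega
    have hc : xs.count [] ≤ xs.length := List.count_le_length
    have hl : neB.length ≤ xs.length := by omega
    omega

-- ===== VERDICT (by name: the statement is the Claim_ definition above) =====
theorem result_spec : Claim_equal_result := by
  intro n _
  unfold Spec_result
  exact result_eq_alt n
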